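-- pv_equiv track=rewrite | github.com/hun23/Daily-Algorithm | ALGO/1BRUTE-FORCE/2304_창고다각형.py | get_x_length
-- ===== SOURCE A (Python) =====
-- def get_x_length(pillar_list, height):
--     left, right = 0, len(pillar_list) - 1
--     left_found = pillar_list[left][1] >= height
--     right_found = pillar_list[right][1] >= height
--     while not (left_found and right_found):
--         if not left_found:
--             left += 1
--             left_found = pillar_list[left][1] >= height
--         if not right_found:
--             right -= 1
--             right_found = pillar_list[right][1] >= height
--     return pillar_list[right][0] - pillar_list[left][0] + 1
-- ===== SOURCE B (Python) =====
-- def get_x_length(pillar_list, height):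
--     xs = [p[0] for p in pillar_list if p[1] >= height]
--     return xs[-1] - xs[0] + 1
-- ===== Notes on version B (the rewrite author's own statement) =====
-- stated objective: simpler
-- what changed: The interleaved two-pointer while loop with four pieces of mutable state is replaced by a single comprehension collecting the x-coordinates of all pillars reaching the height, returning last minus first plus one.
-- outside the precondition, e.g. on get_x_length([[1, 9], [2], [3, 9]], 5): A returns 3, B raises IndexError
import Mathlib
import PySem

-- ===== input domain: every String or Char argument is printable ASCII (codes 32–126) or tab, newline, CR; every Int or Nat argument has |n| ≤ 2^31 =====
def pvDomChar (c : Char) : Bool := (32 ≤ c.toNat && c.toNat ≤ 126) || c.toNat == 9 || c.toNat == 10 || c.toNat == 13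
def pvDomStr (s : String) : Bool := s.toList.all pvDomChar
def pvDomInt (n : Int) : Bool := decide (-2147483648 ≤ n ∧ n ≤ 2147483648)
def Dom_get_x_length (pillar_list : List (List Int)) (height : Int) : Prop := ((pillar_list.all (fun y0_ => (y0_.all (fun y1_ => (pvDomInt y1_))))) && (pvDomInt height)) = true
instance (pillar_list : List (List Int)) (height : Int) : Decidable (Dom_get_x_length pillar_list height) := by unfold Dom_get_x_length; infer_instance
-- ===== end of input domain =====

-- B replaces A's interleaved two-pointer while loop by a single comprehension over the
-- qualifying pillars (simpler decomposition; same O(n) cost).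


-- ===== PORT A =====
-- pillar_list[i][j] as A reads it; .getD 0 only fires where Python raises (outside Pre_).
def pvGet2 (l : List (List Int)) (i j : Int) : Int :=
  ((PySem.List.pyGet? l i).bind (fun p => PySem.List.pyGet? p j)).getD 0

-- A's while loop, fuel-guarded (the fuel only makes the recursion total; inside Pre_ the
-- loop ends before the fuel does).
def pvLoopA (l : List (List Int)) (h : Int) :
    Nat → Int → Int → Bool → Bool → Int × Int
  | 0, left, right, _, _ => (left, right)
  | fuel+1, left, right, lf, rf =>
    if lf && rf then (left, right)
    else
      let left' := if lf then left else left + 1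
      let lf' := if lf then lf else decide (h ≤ pvGet2 l left' 1)
      let right' := if rf then right else right - 1
      let rf' := if rf then rf else decide (h ≤ pvGet2 l right' 1)
      pvLoopA l h fuel left' right' lf' rf'

def get_x_length (pillar_list : List (List Int)) (height : Int) : Int :=
  let right0 : Int := (pillar_list.length : Int) - 1
  let lf0 := decide (height ≤ pvGet2 pillar_list 0 1)
  let rf0 := decide (height ≤ pvGet2 pillar_list right0 1)
  let lr := pvLoopA pillar_list height (2 * pillar_list.length + 2) 0 right0 lf0 rf0
  pvGet2 pillar_list lr.2 0 - pvGet2 pillar_list lr.1 0 + 1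

-- ===== PORT B =====
-- p[1] >= height, the filter of B's comprehension (.getD 0 only fires where Python raises).
def pvQual (h : Int) (p : List Int) : Bool := decide (h ≤ (PySem.List.pyGet? p 1).getD 0)

def get_x_length_alt (pillar_list : List (List Int)) (height : Int) : Int :=
  let xs := (pillar_list.filter (pvQual height)).map (fun p => (PySem.List.pyGet? p 0).getD 0)
  (PySem.List.pyGet? xs (-1)).getD 0 - (PySem.List.pyGet? xs 0).getD 0 + 1

-- ===== PRECONDITION & SPEC =====
-- Pre_ restricts to the source problem's well-formed inputs: a nonempty list of pillars,
-- each carrying an x and a height entry, with at least one pillar reaching `height`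
-- (otherwise both programs raise IndexError). This excludes ragged lists on which A may
-- still return by luck while scanning only well-formed pillars (B raises there).
def Pre_get_x_length (pillar_list : List (List Int)) (height : Int) : Prop :=
  pillar_list ≠ [] ∧ (∀ p ∈ pillar_list, 2 ≤ p.length) ∧
    ∃ p ∈ pillar_list, height ≤ p.getD 1 0
instance (pillar_list : List (List Int)) (height : Int) : Decidable (Pre_get_x_length pillar_list height) := by unfold Pre_get_x_length; infer_instance

def pvWitness_get_x_length : List (List Int) × Int := ([[1, 2], [2, 5], [4, 1]], 2)

def Spec_get_x_length (pillar_list : List (List Int)) (height : Int) (out : Int) : Prop := out = get_x_length_alt pillar_list height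
instance (pillar_list : List (List Int)) (height : Int) (out : Int) : Decidable (Spec_get_x_length pillar_list height out) := by unfold Spec_get_x_length; infer_instance

-- ===== CLAIM (what is proved, stated in full; the proofs are below) =====
def Claim_equal_get_x_length : Prop := ∀ (pillar_list : List (List Int)) (height : Int), Dom_get_x_length pillar_list height → Pre_get_x_length pillar_list height → Spec_get_x_length pillar_list height (get_x_length pillar_list height)

-- ===== LEMMAS AND PROOFS =====

-- pvQual in terms of List.getD (any pillar length)
theorem pvQual_eq_getD (h : Int) (p : List Int) :
    pvQual h p = decide (h ≤ p.getD 1 0) := by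
  rcases p with _ | ⟨a, _ | ⟨b, t⟩⟩ <;>
    simp [pvQual, PySem.List.pyGet?, PySem.List.pyIdx?]

-- the loop's test at a natural in-range index is pvQual of that pillar
theorem pvGet2_one (l : List (List Int)) (h : Int) (k : Nat) (hk : k < l.length) :
    decide (h ≤ pvGet2 l (k : Int) 1) = pvQual h (l.getD k []) := by
  simp [pvGet2, pvQual, PySem.List.pyGet?_natCast, List.getElem?_eq_getElem hk]

-- x-read at a natural in-range index is B's map function of that pillar
theorem pvGet2_zero (l : List (List Int)) (k : Nat) (hk : k < l.length) :
    pvGet2 l (k : Int) 0 = (PySem.List.pyGet? (l.getD k []) 0).getD 0 := by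
  simp [pvGet2, PySem.List.pyGet?_natCast, List.getElem?_eq_getElem hk]

-- head of the filtered list is the first qualifying pillar
theorem filter_head_of_first (q : List Int → Bool) :
    ∀ (l : List (List Int)) (L : Nat), L < l.length →
      q (l.getD L []) = true → (∀ j, j < L → q (l.getD j []) = false) →
      (l.filter q).head? = some (l.getD L [])
  | [], L, hL, _, _ => by simp at hL
  | a :: t, 0, _, hq, _ => by
      simp only [List.getD_cons_zero] at hq ⊢
      simp [hq]
  | a :: t, L+1, hL, hq, hnot => by
      have ha : q a = false := by
        have := hnot 0 (Nat.succ_pos L); simpa using this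
      simp only [List.getD_cons_succ] at hq ⊢
      rw [List.filter_cons, ha]
      exact filter_head_of_first q t L (by simpa using hL) hq
        (fun j hj => by have := hnot (j+1) (by omega); simpa using this)

-- the loop walks left up to L, right down to R, and stops at (L, R)
set_option maxRecDepth 8192 in
theorem pvLoopA_spec (l : List (List Int)) (h : Int) (L R : Nat)
    (hLlt : L < l.length)
    (hqL : pvQual h (l.getD L []) = true)
    (hnotL : ∀ j, j < L → pvQual h (l.getD j []) = false)
    (hqR : pvQual h (l.getD R []) = true)
    (hnotR : ∀ j, R < j → j < l.length → pvQual h (l.getD j []) = false) :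
    ∀ (fuel left right : Nat), left ≤ L → R ≤ right → right < l.length →
      (L - left) + (right - R) < fuel →
      pvLoopA l h fuel (left : Int) (right : Int)
        (pvQual h (l.getD left [])) (pvQual h (l.getD right [])) = ((L : Int), (R : Int)) := by
  intro fuel
  induction fuel with
  | zero => intro left right _ _ _ hf; omega
  | succ fuel ih =>
    intro left right hlL hRr hrn hf
    have hlf : pvQual h (l.getD left []) = decide (left = L) := by
      by_cases hcase : left = L
      · subst hcase; rw [hqL]; simp
      · have hlt : left < L := by omega
        rw [hnotL left hlt]; simp [hcase]
    have hrf : pvQual h (l.getD right []) = decide (right = R) := by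
      by_cases hcase : right = R
      · subst hcase; rw [hqR]; simp
      · have hgt : R < right := by omega
        rw [hnotR right hgt hrn]; simp [hcase]
    rw [pvLoopA, hlf, hrf]
    by_cases hL' : left = L <;> by_cases hR' : right = R
    · subst hL'; subst hR'; simp
    · -- left found, right still moving
      have hr1 : R < right := by omega
      have hcast : (right : Int) - 1 = ((right - 1 : Nat) : Int) := by omega
      have hrec := ih L (right - 1) (le_refl L) (by omega) (by omega) (by omega)
      rw [hqL] at hrec
      simp only [hL', hR', decide_true, decide_false]
      simpa [hcast, pvGet2_one l h (right - 1) (by omega)] using hrec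
    · -- right found, left still moving
      have hl1 : left < L := by omega
      have hcast : (left : Int) + 1 = ((left + 1 : Nat) : Int) := by omega
      have hrec := ih (left + 1) R (by omega) (le_refl R) (by omega) (by omega)
      rw [hqR] at hrec
      rw [← pvGet2_one l h (left + 1) (by omega), ← hcast] at hrec
      simp only [hL', hR', decide_true, decide_false, Bool.false_eq_true, if_false]
      exact hrec
    · -- both still moving
      have hl1 : left < L := by omega
      have hr1 : R < right := by omega
      have hcastl : (left : Int) + 1 = ((left + 1 : Nat) : Int) := by omega
      have hcastr : (right : Int) - 1 = ((right - 1 : Nat) : Int) := by omega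
      have hrec := ih (left + 1) (right - 1) (by omega) (by omega) (by omega) (by omega)
      rw [← pvGet2_one l h (left + 1) (by omega), ← hcastl] at hrec
      rw [← pvGet2_one l h (right - 1) (by omega), ← hcastr] at hrec
      simp only [hL', hR', decide_false, Bool.and_false, Bool.false_eq_true, if_false]
      exact hrec

theorem get_x_length_spec : Claim_equal_get_x_length := by
  intro l h _hDom hPre
  obtain ⟨hne, hlen2, p, hpmem, hph⟩ := hPre
  unfold Spec_get_x_length
  have hn : 0 < l.length := List.length_pos_iff.mpr hne
  set q : List Int → Bool := pvQual h with hqdef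
  -- the qualifying pillar, through pvQual
  have hqp : q p = true := by
    rw [hqdef, pvQual_eq_getD]; exact decide_eq_true hph
  have hex : ∃ x ∈ l, q x := ⟨p, hpmem, hqp⟩
  -- L : leftmost qualifying index
  set L : Nat := l.findIdx q with hLdef
  have hLlt : L < l.length := List.findIdx_lt_length.mpr hex
  have hqL : q (l.getD L []) = true := by
    rw [List.getD_eq_getElem l [] hLlt]; exact List.findIdx_getElem
  have hnotL : ∀ j, j < L → q (l.getD j []) = false := by
    intro j hj
    rw [List.getD_eq_getElem l [] (by omega)]
    exact List.not_of_lt_findIdx hj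
  -- R : rightmost qualifying index, via the reverse
  have hexr : ∃ x ∈ l.reverse, q x := ⟨p, List.mem_reverse.mpr hpmem, hqp⟩
  set K : Nat := l.reverse.findIdx q with hKdef
  have hKlt : K < l.length := by
    have := List.findIdx_lt_length.mpr hexr; simpa using this
  set R : Nat := l.length - 1 - K with hRdef
  have hRlt : R < l.length := by omega
  have hrevK : l.reverse.getD K [] = l.getD R [] := by
    rw [List.getD_eq_getElem l.reverse [] (by simpa using hKlt),
      List.getD_eq_getElem l [] hRlt, List.getElem_reverse]
  have hqR : q (l.getD R []) = true := by
    rw [← hrevK, List.getD_eq_getElem l.reverse [] (by simpa using hKlt)]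
    exact List.findIdx_getElem
  have hnotR : ∀ j, R < j → j < l.length → q (l.getD j []) = false := by
    intro j hRj hjn
    have hj' : l.length - 1 - j < K := by omega
    have hrev := List.not_of_lt_findIdx (p := q) (xs := l.reverse) hj'
    rw [List.getElem_reverse] at hrev
    have hidx : l.length - 1 - (l.length - 1 - j) = j := by omega
    have h2 : q (l.getD (l.length - 1 - (l.length - 1 - j)) []) = false := by
      rw [List.getD_eq_getElem l [] (by omega)]; exact hrev
    rw [hidx] at h2
    rw [List.getD_eq_getElem l [] hjn]
    rw [List.getD_eq_getElem l [] hjn] at h2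
    exact h2
  have hLR : L ≤ R := by
    by_contra hcon
    have := hnotR L (by omega) hLlt
    rw [this] at hqL; exact Bool.false_ne_true hqL
  -- A's side: the loop returns (L, R)
  have hloop := pvLoopA_spec l h L R hLlt hqL hnotL hqR hnotR
    (2 * l.length + 2) 0 (l.length - 1) (by omega) (by omega) (by omega) (by omega)
  have hcast0 : ((0 : Nat) : Int) = 0 := rfl
  have hcastn : ((l.length - 1 : Nat) : Int) = (l.length : Int) - 1 := by omega
  rw [hcast0, hcastn] at hloop
  have hA : get_x_length l h = pvGet2 l (R : Int) 0 - pvGet2 l (L : Int) 0 + 1 := by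
    unfold get_x_length
    rw [← pvGet2_one l h 0 hn, hcast0] at hloop
    rw [← pvGet2_one l h (l.length - 1) (by omega), hcastn] at hloop
    simp only [hloop]
  -- B's side: head and last of the filtered list
  have hhead : (l.filter q).head? = some (l.getD L []) :=
    filter_head_of_first q l L hLlt hqL hnotL
  have hnotRev : ∀ j, j < K → q (l.reverse.getD j []) = false := by
    intro j hj
    rw [List.getD_eq_getElem l.reverse [] (by simp; omega), List.getElem_reverse]
    have := hnotR (l.length - 1 - j) (by omega) (by omega)
    rw [List.getD_eq_getElem l [] (by omega)] at this
    exact this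
  have hlast : (l.filter q).getLast? = some (l.getD R []) := by
    have hfrev : l.reverse.filter q = (l.filter q).reverse := List.filter_reverse ..
    have hh := filter_head_of_first q l.reverse K (by simpa using hKlt)
      (by rw [hrevK]; exact hqR) hnotRev
    rw [hfrev, hrevK] at hh
    rw [List.getLast?_eq_head?_reverse]
    exact hh
  -- put the two sides together
  rw [hA]
  unfold get_x_length_alt
  simp only [PySem.List.pyGet?_neg_one, PySem.List.pyGet?_zero]
  rw [List.getLast?_map, hlast, ← List.head?_eq_getElem?, List.head?_map, hhead]
  simp [pvGet2_zero l R hRlt, pvGet2_zero l L hLlt, PySem.List.pyGet?_zero]
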